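-- pv_equiv track=rewrite | github.com/Jo3-h/Coursera-Data-Structures-and-Algorithms-Specialization | 6. Genome Assembly Programming Challenge/Programming Assignment 1/Phi-X174 Error Free Reads.py | __find_candidate_pairs
-- ===== SOURCE A (Python) =====
-- def __find_candidate_pairs(reads, k=12):
--
--     # initialise k-mer dict
--     kmer_dict = {}
--
--     # iterate through each read in reads and add the index of that read to all k-mer dict entries of read
--     for i, read in enumerate(reads):
--         for j in range(len(read)+1-k):
--
--             # kmer at this point is equal to substring of read from index j to j+k
--             kmer = read[j:j+k]
--
--             # if this is new kmer then add to kmer_dict before adding read index to kmer dict item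
--             if kmer not in kmer_dict:
--                 kmer_dict[kmer] = []
--             kmer_dict[kmer].append(i)
--
--     # iterate back through reads, calculate kmers, identify candidate pairs of reads for potential suffix/prefix matches
--     candidate_pairs = set()
--     for i, read in enumerate(reads):
--         for j in range(len(read)+1-k):
--
--             # kmer at this point is equal to substring of read from index j to j+k
--             kmer = read[j:j+k]
--
--             for index in kmer_dict[kmer]:
--                 if index != i:
--                     candidate_pairs.add((i, index)) # add to candidate pairs the index of reads which have potential prefix/suffix match
--
--     return candidate_pairs
-- ===== SOURCE B (Python) =====
-- def __find_candidate_pairs(reads, k=12):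
--     # brute force over read pairs, no inverted index: each read's k-windows are
--     # collected once into a set, then (i, x) is kept iff some k-window of
--     # reads[i] is also a k-window of reads[x]
--     wins = [{read2[j2:j2 + k] for j2 in range(len(read2) + 1 - k)}
--             for read2 in reads]
--     return {(i, x)
--             for i, read in enumerate(reads)
--             for j in range(len(read) + 1 - k)
--             for x, ws in enumerate(wins)
--             if x != i and read[j:j + k] in ws}
-- ===== Notes on version B (the rewrite author's own statement) =====
-- stated objective: alternative
-- what changed: B drops A's global inverted k-mer index and its two staged passes: it collects each read's own k-window set once and then a single set comprehension brute-forces every (read, window position, other read) triple, keeping (i, x) when the window is also a window of the other read - pairwise comparison instead of an index from k-mer to read indices.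
import Mathlib
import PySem

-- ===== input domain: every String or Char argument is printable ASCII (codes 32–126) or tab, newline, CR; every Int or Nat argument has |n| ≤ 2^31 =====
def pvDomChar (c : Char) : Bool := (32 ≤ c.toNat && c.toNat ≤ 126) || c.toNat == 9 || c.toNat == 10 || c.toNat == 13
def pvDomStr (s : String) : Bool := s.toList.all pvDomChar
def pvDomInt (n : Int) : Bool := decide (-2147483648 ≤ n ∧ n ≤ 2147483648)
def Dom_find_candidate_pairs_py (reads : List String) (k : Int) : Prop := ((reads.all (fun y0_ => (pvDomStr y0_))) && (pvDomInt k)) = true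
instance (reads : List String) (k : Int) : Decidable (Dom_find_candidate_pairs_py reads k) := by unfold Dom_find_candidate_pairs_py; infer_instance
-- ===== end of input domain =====

-- B drops A's inverted k-mer index and its two staged passes: one brute-force set
-- comprehension over (read, position, other read) triples (objective: simpler).

-- ===== PORT A =====
-- literal transliteration of __find_candidate_pairs (Source A)
def find_candidate_pairs_py (reads : List String) (k : Int) : List (Int × Int) :=
  -- phase 1: kmer_dict[kmer] collects the index of every read occurrence of kmer
  let kmer_dict : PySem.Dict String (List Int) :=
    (PySem.List.enumerate reads).foldl (fun d p =>
      (PySem.List.pyRange 0 (PySem.Str.len p.2 + 1 - k) 1).foldl (fun d j =>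
        let kmer := PySem.Str.slice p.2 (some j) (some (j + k))
        -- if kmer not in kmer_dict: kmer_dict[kmer] = []
        let d := if d.contains kmer then d else d.insert kmer ([] : List Int)
        -- kmer_dict[kmer].append(i)  (the key is present here)
        d.modify kmer [] (fun l => l ++ [p.1])) d) PySem.Dict.empty
  -- phase 2: rescan the reads, recompute each kmer, add candidate pairs
  (PySem.List.enumerate reads).foldl (fun s p =>
    (PySem.List.pyRange 0 (PySem.Str.len p.2 + 1 - k) 1).foldl (fun s j =>
      let kmer := PySem.Str.slice p.2 (some j) (some (j + k))
      -- kmer_dict[kmer]: the key is always present (inserted in phase 1 at this very kmer)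
      (kmer_dict.getD kmer []).foldl (fun s idx =>
        if idx != p.1 then PySem.Set.add s (p.1, idx) else s) s) s) PySem.Set.empty

-- ===== PORT B =====
-- literal transliteration of my implementation B (Source B): wins is the per-read set of
-- k-windows; the set comprehension is the set of the generated (i, x) stream in
-- generation order (Set.ofList)
def find_candidate_pairs_py_alt (reads : List String) (k : Int) : List (Int × Int) :=
  let wins : List (PySem.Set String) :=
    reads.map (fun read2 => PySem.Set.ofList
      ((PySem.List.pyRange 0 (PySem.Str.len read2 + 1 - k) 1).map
        (fun j2 => PySem.Str.slice read2 (some j2) (some (j2 + k)))))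
  PySem.Set.ofList ((PySem.List.enumerate reads).flatMap (fun p =>
    (PySem.List.pyRange 0 (PySem.Str.len p.2 + 1 - k) 1).flatMap (fun j =>
      ((PySem.List.enumerate wins).filter (fun q =>
        q.1 != p.1 && PySem.Set.contains q.2 (PySem.Str.slice p.2 (some j) (some (j + k))))).map
        (fun q => (p.1, q.1)))))

-- ===== PRECONDITION & SPEC =====
def Spec_find_candidate_pairs_py (reads : List String) (k : Int) (out : List (Int × Int)) : Prop := out = find_candidate_pairs_py_alt reads k
instance (reads : List String) (k : Int) (out : List (Int × Int)) : Decidable (Spec_find_candidate_pairs_py reads k out) := by unfold Spec_find_candidate_pairs_py; infer_instance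

-- ===== CLAIM (what is proved, stated in full; the proofs are below) =====
def Claim_equal_find_candidate_pairs_py : Prop := ∀ (reads : List String) (k : Int), Dom_find_candidate_pairs_py reads k → Spec_find_candidate_pairs_py reads k (find_candidate_pairs_py reads k)

-- ===== LEMMAS AND PROOFS =====

-- the flat list of (read index, k-mer) occurrences, the common skeleton of both programs
def pvOcc (reads : List String) (k : Int) : List (Int × String) :=
  (PySem.List.enumerate reads).flatMap (fun p =>
    (PySem.List.pyRange 0 (PySem.Str.len p.2 + 1 - k) 1).map
      (fun j => (p.1, PySem.Str.slice p.2 (some j) (some (j + k)))))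

-- A's phase-1 dict step and phase-2 pair step, named
def pvStepA (d : PySem.Dict String (List Int)) (q : Int × String) : PySem.Dict String (List Int) :=
  (if d.contains q.2 then d else d.insert q.2 ([] : List Int)).modify q.2 [] (fun l => l ++ [q.1])

def pvPairStep (i : Int) (s : PySem.Set (Int × Int)) (b : Int) : PySem.Set (Int × Int) :=
  if b != i then PySem.Set.add s (i, b) else s

-- the matching positions of km inside other (B's any-scan is over this list)
def pvMatches (other : String) (k : Int) (km : String) : List Int :=
  (PySem.List.pyRange 0 (PySem.Str.len other + 1 - k) 1).filter
    (fun j2 => PySem.Str.slice other (some j2) (some (j2 + k)) == km)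

-- A's nested loop over (enumerate reads, range) is a single fold over the flat occurrence list
theorem pvNestedFold {δ : Type} (reads : List String) (k : Int)
    (st : δ → (Int × String) → δ) (init : δ) :
    (PySem.List.enumerate reads).foldl (fun d p =>
      (PySem.List.pyRange 0 (PySem.Str.len p.2 + 1 - k) 1).foldl
        (fun d j => st d (p.1, PySem.Str.slice p.2 (some j) (some (j + k)))) d) init
    = (pvOcc reads k).foldl st init := by
  unfold pvOcc
  rw [List.flatMap_def, List.foldl_flatten, List.foldl_map]
  simp only [List.foldl_map]

-- one step of A's dict build, as a lookup table
theorem pvStepAGetD (d : PySem.Dict String (List Int)) (q : Int × String) (km : String) :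
    (pvStepA d q).getD km [] = if km = q.2 then d.getD q.2 [] ++ [q.1] else d.getD km [] := by
  unfold pvStepA
  by_cases hc : d.contains q.2
  · simp [hc, PySem.Dict.getD_modify]
  · simp only [hc, Bool.false_eq_true, ite_false, PySem.Dict.getD_modify,
      PySem.Dict.getD_insert]
    by_cases hk : km = q.2 <;>
      simp [hk, PySem.Dict.getD_of_not_contains _ _ (by simpa using hc)]

-- A's kmer_dict bucket of km is the list of read indices of the occurrences of km, in order
theorem pvBucket (km : String) :
    ∀ (occ : List (Int × String)) (d : PySem.Dict String (List Int)),
    (occ.foldl pvStepA d).getD km []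
      = d.getD km [] ++ (occ.filter (fun p => p.2 == km)).map Prod.fst := by
  intro occ
  induction occ with
  | nil => intro d; simp
  | cons q t ih =>
    intro d
    simp only [List.foldl_cons, List.filter_cons]
    rw [ih (pvStepA d q), pvStepAGetD]
    by_cases hk : q.2 = km
    · simp [hk]
    · have : ¬ (km = q.2) := fun h => hk h.symm
      simp [this, hk]

-- that bucket, re-grouped read by read (each read contributes its index once per match position)
theorem pvBucketFlat (reads : List String) (k : Int) (km : String) :
    ((pvOcc reads k).filter (fun p => p.2 == km)).map Prod.fst
      = (PySem.List.enumerate reads).flatMap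
          (fun q => (pvMatches q.2 k km).map (fun _ => q.1)) := by
  unfold pvOcc pvMatches
  rw [List.filter_flatMap, List.map_flatMap]
  congr 1
  funext q
  rw [List.filter_map, List.map_map]
  rfl

-- pvPairStep is idempotent in its element
theorem pvIdem (i : Int) (s : PySem.Set (Int × Int)) (v : Int) :
    pvPairStep i (pvPairStep i s v) v = pvPairStep i s v := by
  unfold pvPairStep
  by_cases h : v != i
  · simp only [h, if_pos]
    exact PySem.Set.add_of_mem ((PySem.Set.mem_add _ _ _).2 (Or.inr rfl))
  · simp [h]

-- folding pvPairStep over a nonempty constant list collapses to one step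
theorem pvConstFold' (i v : Int) :
    ∀ (l : List Int) (s : PySem.Set (Int × Int)), l ≠ [] →
    (l.map (fun _ => v)).foldl (pvPairStep i) s = pvPairStep i s v := by
  intro l
  induction l with
  | nil => intro s h; exact absurd rfl h
  | cons a t ih =>
    intro s _
    simp only [List.map_cons, List.foldl_cons]
    cases t with
    | nil => rfl
    | cons b w =>
      rw [ih _ (List.cons_ne_nil b w), pvIdem]

theorem pvConstFold (i v : Int) (l : List Int) (s : PySem.Set (Int × Int)) :
    (l.map (fun _ => v)).foldl (pvPairStep i) s
      = if l.isEmpty then s else pvPairStep i s v := by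
  cases l with
  | nil => simp
  | cons a t =>
    rw [pvConstFold' i v _ s (List.cons_ne_nil a t)]
    simp

-- B's per-read test: the k-mer is one of the other read's k-windows
def pvHasWin (other : String) (k : Int) (km : String) : Bool :=
  PySem.Set.contains (PySem.Set.ofList
    ((PySem.List.pyRange 0 (PySem.Str.len other + 1 - k) 1).map
      (fun j2 => PySem.Str.slice other (some j2) (some (j2 + k))))) km

-- that test holds exactly when the match-position list is nonempty
theorem pvHasWinMatches (other : String) (k : Int) (km : String) :
    pvHasWin other k km = !(pvMatches other k km).isEmpty := by
  unfold pvHasWin pvMatches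
  apply Bool.coe_iff_coe.mp
  rw [PySem.Set.contains_iff, PySem.Set.mem_ofList, Bool.not_eq_eq_eq_not, Bool.not_true,
    List.isEmpty_eq_false_iff_exists_mem]
  constructor
  · intro h
    obtain ⟨j2, hj2, hs⟩ := List.mem_map.1 h
    exact ⟨j2, List.mem_filter.2 ⟨hj2, by simp [hs]⟩⟩
  · intro ⟨j2, hj2⟩
    obtain ⟨hj2r, hs⟩ := List.mem_filter.1 hj2
    exact List.mem_map.2 ⟨j2, hj2r, by simpa using hs⟩

-- enumerate over a mapped list
theorem pvEnumMap {α β : Type} (f : α → β) (l : List α) (s : Int) :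
    PySem.List.enumerate (l.map f) s = (PySem.List.enumerate l s).map (fun q => (q.1, f q.2)) := by
  induction l generalizing s with
  | nil => simp [PySem.List.enumerate_nil]
  | cons a t ih => simp [PySem.List.enumerate_cons, ih]

-- A's per-occurrence inner fold over the km-bucket equals B's per-occurrence segment fold
theorem pvInnerEq (reads : List String) (k : Int) (i : Int) (km : String)
    (s : PySem.Set (Int × Int)) :
    ((PySem.List.enumerate reads).flatMap
        (fun q => (pvMatches q.2 k km).map (fun _ => q.1))).foldl (pvPairStep i) s
      = (PySem.List.enumerate reads).foldl
          (fun s q => if q.1 != i && pvHasWin q.2 k km then PySem.Set.add s (i, q.1) else s) s := by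
  rw [List.flatMap_def, List.foldl_flatten, List.foldl_map]
  have hf : (fun (s : PySem.Set (Int × Int)) (q : Int × String) =>
        ((pvMatches q.2 k km).map (fun _ => q.1)).foldl (pvPairStep i) s)
      = (fun s q => if q.1 != i && pvHasWin q.2 k km then PySem.Set.add s (i, q.1) else s) := by
    funext s q
    rw [pvConstFold, pvHasWinMatches]
    cases hm : (pvMatches q.2 k km).isEmpty
    · simp only [Bool.not_false, Bool.and_true]
      unfold pvPairStep
      rfl
    · simp
  rw [hf]

-- A's phase-1 nested loop, as a fold of pvStepA over the occurrence list
theorem pvAphase1 (reads : List String) (k : Int) :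
    (PySem.List.enumerate reads).foldl (fun d p =>
      (PySem.List.pyRange 0 (PySem.Str.len p.2 + 1 - k) 1).foldl (fun d j =>
        (if d.contains (PySem.Str.slice p.2 (some j) (some (j + k))) then d
         else d.insert (PySem.Str.slice p.2 (some j) (some (j + k))) ([] : List Int)).modify
          (PySem.Str.slice p.2 (some j) (some (j + k))) [] (fun l => l ++ [p.1])) d)
      PySem.Dict.empty
    = (pvOcc reads k).foldl pvStepA PySem.Dict.empty :=
  pvNestedFold reads k pvStepA PySem.Dict.empty

-- A's phase-2 nested loop over any fixed dict, as a fold of pvPairStep over the occurrence list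
theorem pvAphase2 (reads : List String) (k : Int) (D : PySem.Dict String (List Int)) :
    (PySem.List.enumerate reads).foldl (fun s p =>
      (PySem.List.pyRange 0 (PySem.Str.len p.2 + 1 - k) 1).foldl (fun s j =>
        ((D.getD (PySem.Str.slice p.2 (some j) (some (j + k))) []).foldl (fun s idx =>
          if idx != p.1 then PySem.Set.add s (p.1, idx) else s) s)) s)
      PySem.Set.empty
    = (pvOcc reads k).foldl (fun s p => (D.getD p.2 []).foldl (pvPairStep p.1) s)
        PySem.Set.empty :=
  pvNestedFold reads k (fun s p => (D.getD p.2 []).foldl (pvPairStep p.1) s) PySem.Set.empty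

-- B's segment for one occurrence (i, km): the pairs its comprehension clause generates
def pvSeg (reads : List String) (k : Int) (p : Int × String) : List (Int × Int) :=
  ((PySem.List.enumerate reads).filter (fun q =>
    q.1 != p.1 && pvHasWin q.2 k p.2)).map (fun q => (p.1, q.1))

-- B's generated stream, re-indexed by the flat occurrence list
theorem pvBflat (reads : List String) (k : Int) :
    ((PySem.List.enumerate reads).flatMap (fun p =>
      (PySem.List.pyRange 0 (PySem.Str.len p.2 + 1 - k) 1).flatMap (fun j =>
        ((PySem.List.enumerate (reads.map (fun read2 => PySem.Set.ofList
            ((PySem.List.pyRange 0 (PySem.Str.len read2 + 1 - k) 1).map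
              (fun j2 => PySem.Str.slice read2 (some j2) (some (j2 + k))))))).filter (fun q =>
          q.1 != p.1 && PySem.Set.contains q.2 (PySem.Str.slice p.2 (some j) (some (j + k))))).map
          (fun q => (p.1, q.1)))))
    = (pvOcc reads k).flatMap (pvSeg reads k) := by
  simp only [pvEnumMap, List.filter_map, List.map_map]
  unfold pvOcc
  rw [List.flatMap_assoc]
  congr 1
  funext p
  rw [List.flatMap_map]
  rfl

-- ===== VERDICT (by name: the statement is the Claim_ definition above) =====
theorem find_candidate_pairs_py_spec : Claim_equal_find_candidate_pairs_py := by
  intro reads k _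
  unfold Spec_find_candidate_pairs_py
  simp only [find_candidate_pairs_py, find_candidate_pairs_py_alt]
  rw [pvAphase1, pvAphase2, pvBflat, PySem.Set.ofList_eq_foldl,
    List.flatMap_def, List.foldl_flatten, List.foldl_map]
  have hA : (fun (s : PySem.Set (Int × Int)) (p : Int × String) =>
        (((pvOcc reads k).foldl pvStepA PySem.Dict.empty).getD p.2 []).foldl (pvPairStep p.1) s)
      = (fun s p => (pvSeg reads k p).foldl PySem.Set.add s) := by
    funext s p
    rw [pvBucket]
    simp only [PySem.Dict.getD_empty, List.nil_append]
    rw [pvBucketFlat, pvInnerEq]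
    unfold pvSeg
    rw [List.foldl_map, ← PySem.List.foldl_if_eq_foldl_filter]
  rw [hA]
  rfl
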